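-- pv_equiv track=rewrite | github.com/soodebbie/Chinese-Chess | src/chinese_chess/game.py | _path_between
-- ===== SOURCE A (Python) =====
-- from typing import Iterable, Optional, Tuple
--
-- Coordinate = Tuple[int, int]  # (row, col)
--
-- def _path_between(start: Coordinate, end: Coordinate) -> Iterable[Coordinate]:
--     r0, c0 = start
--     r1, c1 = end
--     if r0 == r1:
--         step = 1 if c1 > c0 else -1
--         for c in range(c0 + step, c1, step):
--             yield (r0, c)
--     elif c0 == c1:
--         step = 1 if r1 > r0 else -1
--         for r in range(r0 + step, r1, step):
--             yield (r, c0)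
-- ===== SOURCE B (Python) =====
-- def _path_between(start, end):
--     # Walk backwards from end toward start with a unit sign step,
--     # collecting cells, then reverse; returns a list (same sequence of values).
--     r0, c0 = start
--     r1, c1 = end
--     if r0 != r1 and c0 != c1:
--         return []
--     out = []
--     p0, p1 = r1, c1
--     while True:
--         p0 += (r0 > p0) - (r0 < p0)
--         p1 += (c0 > p1) - (c0 < p1)
--         if (p0, p1) == (r0, c0):
--             break
--         out.append((p0, p1))
--     out.reverse()
--     return out
-- ===== Notes on version B (the rewrite author's own statement) =====
-- stated objective: alternative
-- what changed: Instead of two axis-specific forward range loops yielding cells, B walks backwards from end toward start with a unified unit sign step, accumulates the visited cells and reverses the accumulator at the end (returned as a list of the same values).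
import Mathlib
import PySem

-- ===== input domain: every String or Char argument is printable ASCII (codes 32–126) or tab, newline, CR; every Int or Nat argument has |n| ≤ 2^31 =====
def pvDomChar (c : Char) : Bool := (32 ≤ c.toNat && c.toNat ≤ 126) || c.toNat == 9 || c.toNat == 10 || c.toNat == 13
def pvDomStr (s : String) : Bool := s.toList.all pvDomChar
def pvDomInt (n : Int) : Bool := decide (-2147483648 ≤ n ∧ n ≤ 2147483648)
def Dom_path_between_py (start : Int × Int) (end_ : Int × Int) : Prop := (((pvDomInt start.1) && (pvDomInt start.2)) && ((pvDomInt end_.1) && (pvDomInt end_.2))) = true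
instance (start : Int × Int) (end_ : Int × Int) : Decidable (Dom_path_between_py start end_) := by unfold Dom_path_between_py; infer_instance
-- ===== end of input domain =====

-- B walks backwards from end toward start with a unit sign step, accumulating then
-- reversing, instead of A's two axis-specific forward range loops (objective: alternative;
-- B returns a list of the same values where A yields from a generator).

-- ===== PORT A =====
def path_between_py (start : Int × Int) (end_ : Int × Int) : List (Int × Int) :=
  let r0 := start.1; let c0 := start.2
  let r1 := end_.1; let c1 := end_.2
  if r0 = r1 then
    let step : Int := if c1 > c0 then 1 else -1
    (PySem.List.pyRange (c0 + step) c1 step).map (fun c => (r0, c))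
  else if c0 = c1 then
    let step : Int := if r1 > r0 then 1 else -1
    (PySem.List.pyRange (r0 + step) r1 step).map (fun r => (r, c0))
  else []

-- ===== PORT B =====
-- (r0 > p0) - (r0 < p0) of Source B
def pvSgnStep (r0 p0 : Int) : Int := (if r0 > p0 then (1:Int) else 0) - (if r0 < p0 then (1:Int) else 0)

-- the while-loop of Source B: step (p0,p1) toward (r0,c0), appending each visited cell until start is reached
-- structural recursion on the remaining step count (= the distance left to walk),
-- which bounds the number of iterations of Source B's while-loop exactly
def pvBackWalkGo : Nat → Int → Int → Int → Int → List (Int × Int) → List (Int × Int)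
  | 0, _, _, _, _, out => out
  | Nat.succ fuel, r0, c0, p0, p1, out =>
    if p0 + pvSgnStep r0 p0 = r0 ∧ p1 + pvSgnStep c0 p1 = c0 then out
    else pvBackWalkGo fuel r0 c0 (p0 + pvSgnStep r0 p0) (p1 + pvSgnStep c0 p1)
          (out ++ [(p0 + pvSgnStep r0 p0, p1 + pvSgnStep c0 p1)])

-- the while-loop of Source B: step (p0,p1) toward (r0,c0), appending each visited cell until start is reached
def pvBackWalk (r0 c0 p0 p1 : Int) (out : List (Int × Int)) : List (Int × Int) :=
  pvBackWalkGo ((r0 - p0).natAbs + (c0 - p1).natAbs) r0 c0 p0 p1 out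

def path_between_py_alt (start : Int × Int) (end_ : Int × Int) : List (Int × Int) :=
  let r0 := start.1; let c0 := start.2
  let r1 := end_.1; let c1 := end_.2
  if r0 ≠ r1 ∧ c0 ≠ c1 then []
  else (pvBackWalk r0 c0 r1 c1 []).reverse

-- ===== PRECONDITION & SPEC =====
def Spec_path_between_py (start : Int × Int) (end_ : Int × Int) (out : List (Int × Int)) : Prop := out = path_between_py_alt start end_
instance (start : Int × Int) (end_ : Int × Int) (out : List (Int × Int)) : Decidable (Spec_path_between_py start end_ out) := by unfold Spec_path_between_py; infer_instance

-- ===== CLAIM (what is proved, stated in full; the proofs are below) =====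
def Claim_equal_path_between_py : Prop := ∀ (start : Int × Int) (end_ : Int × Int), Dom_path_between_py start end_ → Spec_path_between_py start end_ (path_between_py start end_)

-- ===== LEMMAS AND PROOFS =====

-- horizontal, end to the right of start: the walk collects c0+n, c0+n-1, …, c0+1 (descending)
theorem pvBackWalkGo_right (r0 c0 : Int) : ∀ (n : Nat) (out : List (Int × Int)),
    pvBackWalkGo (n + 1) r0 c0 r0 (c0 + n + 1) out
      = out ++ (PySem.List.pyRange (c0 + n) c0 (-1)).map (fun c => (r0, c)) := by
  intro n
  induction n with
  | zero =>
    intro out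
    rw [pvBackWalkGo]
    simp [pvSgnStep]
  | succ m ih =>
    intro out
    rw [pvBackWalkGo]
    rw [if_neg (by simp [pvSgnStep]; split_ifs <;> push_cast at * <;> omega)]
    rw [show c0 + (↑(m+1):Int) + 1 + pvSgnStep c0 (c0 + (↑(m+1):Int) + 1) = c0 + ↑m + 1 by
      simp [pvSgnStep]; split_ifs <;> push_cast at * <;> omega]
    rw [show r0 + pvSgnStep r0 r0 = r0 by simp [pvSgnStep]]
    rw [ih]
    rw [PySem.List.pyRange_neg_one_cons (by push_cast; omega : c0 < c0 + (↑(m+1):Int))]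
    rw [show c0 + (↑(m+1):Int) - 1 = c0 + ↑m by push_cast; ring]
    simp
    ring_nf

-- horizontal, end to the left of start: the walk collects c1+1, c1+2, …, c0-1 (ascending)
theorem pvBackWalkGo_left (r0 c0 : Int) : ∀ (n : Nat) (out : List (Int × Int)),
    pvBackWalkGo (n + 1) r0 c0 r0 (c0 - n - 1) out
      = out ++ (PySem.List.pyRange (c0 - n) c0 1).map (fun c => (r0, c)) := by
  intro n
  induction n with
  | zero =>
    intro out
    rw [pvBackWalkGo]
    simp [pvSgnStep]
  | succ m ih =>
    intro out
    rw [pvBackWalkGo]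
    rw [if_neg (by simp [pvSgnStep]; split_ifs <;> push_cast at * <;> omega)]
    rw [show c0 - (↑(m+1):Int) - 1 + pvSgnStep c0 (c0 - (↑(m+1):Int) - 1) = c0 - ↑m - 1 by
      simp [pvSgnStep]; split_ifs <;> push_cast at * <;> omega]
    rw [show r0 + pvSgnStep r0 r0 = r0 by simp [pvSgnStep]]
    rw [ih]
    rw [PySem.List.pyRange_one_cons (by push_cast; omega : c0 - (↑(m+1):Int) < c0)]
    rw [show c0 - (↑(m+1):Int) + 1 = c0 - ↑m by push_cast; ring]
    simp
    ring_nf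

-- vertical, end below start (r1 > r0): the walk collects r0+n, …, r0+1 (descending)
theorem pvBackWalkGo_down (r0 c0 : Int) : ∀ (n : Nat) (out : List (Int × Int)),
    pvBackWalkGo (n + 1) r0 c0 (r0 + n + 1) c0 out
      = out ++ (PySem.List.pyRange (r0 + n) r0 (-1)).map (fun r => (r, c0)) := by
  intro n
  induction n with
  | zero =>
    intro out
    rw [pvBackWalkGo]
    simp [pvSgnStep]
  | succ m ih =>
    intro out
    rw [pvBackWalkGo]
    rw [if_neg (by simp [pvSgnStep]; split_ifs <;> push_cast at * <;> omega)]
    rw [show r0 + (↑(m+1):Int) + 1 + pvSgnStep r0 (r0 + (↑(m+1):Int) + 1) = r0 + ↑m + 1 by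
      simp [pvSgnStep]; split_ifs <;> push_cast at * <;> omega]
    rw [show c0 + pvSgnStep c0 c0 = c0 by simp [pvSgnStep]]
    rw [ih]
    rw [PySem.List.pyRange_neg_one_cons (by push_cast; omega : r0 < r0 + (↑(m+1):Int))]
    rw [show r0 + (↑(m+1):Int) - 1 = r0 + ↑m by push_cast; ring]
    simp
    ring_nf

-- vertical, end above start (r1 < r0): the walk collects r1+1, …, r0-1 (ascending)
theorem pvBackWalkGo_up (r0 c0 : Int) : ∀ (n : Nat) (out : List (Int × Int)),
    pvBackWalkGo (n + 1) r0 c0 (r0 - n - 1) c0 out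
      = out ++ (PySem.List.pyRange (r0 - n) r0 1).map (fun r => (r, c0)) := by
  intro n
  induction n with
  | zero =>
    intro out
    rw [pvBackWalkGo]
    simp [pvSgnStep]
  | succ m ih =>
    intro out
    rw [pvBackWalkGo]
    rw [if_neg (by simp [pvSgnStep]; split_ifs <;> push_cast at * <;> omega)]
    rw [show r0 - (↑(m+1):Int) - 1 + pvSgnStep r0 (r0 - (↑(m+1):Int) - 1) = r0 - ↑m - 1 by
      simp [pvSgnStep]; split_ifs <;> push_cast at * <;> omega]
    rw [show c0 + pvSgnStep c0 c0 = c0 by simp [pvSgnStep]]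
    rw [ih]
    rw [PySem.List.pyRange_one_cons (by push_cast; omega : r0 - (↑(m+1):Int) < r0)]
    rw [show r0 - (↑(m+1):Int) + 1 = r0 - ↑m by push_cast; ring]
    simp
    ring_nf

-- the walk with its exact fuel, in the four directions
theorem pvBackWalk_right (r0 c0 : Int) (n : Nat) (out : List (Int × Int)) :
    pvBackWalk r0 c0 r0 (c0 + n + 1) out
      = out ++ (PySem.List.pyRange (c0 + n) c0 (-1)).map (fun c => (r0, c)) := by
  unfold pvBackWalk
  rw [show (r0 - r0).natAbs + (c0 - (c0 + (n:Int) + 1)).natAbs = n + 1 by omega]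
  exact pvBackWalkGo_right r0 c0 n out

theorem pvBackWalk_left (r0 c0 : Int) (n : Nat) (out : List (Int × Int)) :
    pvBackWalk r0 c0 r0 (c0 - n - 1) out
      = out ++ (PySem.List.pyRange (c0 - n) c0 1).map (fun c => (r0, c)) := by
  unfold pvBackWalk
  rw [show (r0 - r0).natAbs + (c0 - (c0 - (n:Int) - 1)).natAbs = n + 1 by omega]
  exact pvBackWalkGo_left r0 c0 n out

theorem pvBackWalk_down (r0 c0 : Int) (n : Nat) (out : List (Int × Int)) :
    pvBackWalk r0 c0 (r0 + n + 1) c0 out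
      = out ++ (PySem.List.pyRange (r0 + n) r0 (-1)).map (fun r => (r, c0)) := by
  unfold pvBackWalk
  rw [show (r0 - (r0 + (n:Int) + 1)).natAbs + (c0 - c0).natAbs = n + 1 by omega]
  exact pvBackWalkGo_down r0 c0 n out

theorem pvBackWalk_up (r0 c0 : Int) (n : Nat) (out : List (Int × Int)) :
    pvBackWalk r0 c0 (r0 - n - 1) c0 out
      = out ++ (PySem.List.pyRange (r0 - n) r0 1).map (fun r => (r, c0)) := by
  unfold pvBackWalk
  rw [show (r0 - (r0 - (n:Int) - 1)).natAbs + (c0 - c0).natAbs = n + 1 by omega]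
  exact pvBackWalkGo_up r0 c0 n out

-- ===== VERDICT (by name: the statement is the Claim_ definition above) =====
theorem path_between_py_spec : Claim_equal_path_between_py := by
  intro start end_ _
  obtain ⟨r0, c0⟩ := start
  obtain ⟨r1, c1⟩ := end_
  unfold Spec_path_between_py path_between_py path_between_py_alt
  rcases lt_trichotomy r0 r1 with hr | hr | hr <;>
    rcases lt_trichotomy c0 c1 with hc | hc | hc
  -- r0<r1, c0<c1 : both empty
  · simp [hr.ne, hc.ne]
  -- r0<r1, c0=c1 : vertical, downward
  · subst hc
    set n : Nat := (r1 - r0 - 1).toNat with hn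
    have hr1 : r1 = r0 + (n : Int) + 1 := by omega
    rw [hr1] at hr ⊢
    simp only [ne_eq, hr.ne, not_true_eq_false, and_false, if_false, gt_iff_lt,
      hr, if_true, pvBackWalk_down, List.nil_append]
    rw [PySem.List.pyRange_neg_one_eq_reverse, List.map_reverse, List.reverse_reverse]
  -- r0<r1, c1<c0 : both empty
  · simp [hr.ne, hc.ne']
  -- r0=r1, c0<c1 : horizontal, rightward
  · subst hr
    set n : Nat := (c1 - c0 - 1).toNat with hn
    have hc1 : c1 = c0 + (n : Int) + 1 := by omega
    rw [hc1] at hc ⊢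
    simp only [ne_eq, not_true_eq_false, false_and, if_false, gt_iff_lt,
      hc, if_true, pvBackWalk_right, List.nil_append]
    rw [PySem.List.pyRange_neg_one_eq_reverse, List.map_reverse, List.reverse_reverse]
  -- r0=r1, c0=c1 : identical points, both empty
  · subst hr; subst hc
    rw [if_pos rfl, if_neg (lt_irrefl c0), if_neg (by simp)]
    simp [pvBackWalk, pvBackWalkGo, pvSgnStep]
  -- r0=r1, c1<c0 : horizontal, leftward
  · subst hr
    set n : Nat := (c0 - c1 - 1).toNat with hn
    have hc1 : c1 = c0 - (n : Int) - 1 := by omega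
    rw [hc1] at hc ⊢
    simp only [ne_eq, not_true_eq_false, false_and, if_false, reduceIte, gt_iff_lt,
      pvBackWalk_left, List.nil_append]
    rw [if_neg (by omega : ¬ c0 < c0 - (n:Int) - 1)]
    rw [show c0 + (-1 : Int) = c0 - 1 by ring, PySem.List.pyRange_neg_one_eq_reverse]
    rw [show c0 - (n:Int) - 1 + 1 = c0 - (n:Int) by ring, show c0 - 1 + 1 = c0 by ring]
    rw [List.map_reverse]
  -- r1<r0, c0<c1 : both empty
  · simp [hr.ne', hc.ne]
  -- r1<r0, c0=c1 : vertical, upward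
  · subst hc
    set n : Nat := (r0 - r1 - 1).toNat with hn
    have hr1 : r1 = r0 - (n : Int) - 1 := by omega
    rw [hr1] at hr ⊢
    simp only [ne_eq, hr.ne', not_true_eq_false, and_false, if_false, reduceIte, gt_iff_lt,
      pvBackWalk_up, List.nil_append]
    rw [if_neg (by omega : ¬ r0 < r0 - (n:Int) - 1)]
    rw [show r0 + (-1 : Int) = r0 - 1 by ring, PySem.List.pyRange_neg_one_eq_reverse]
    rw [show r0 - (n:Int) - 1 + 1 = r0 - (n:Int) by ring, show r0 - 1 + 1 = r0 by ring]
    rw [List.map_reverse]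
  -- r1<r0, c1<c0 : both empty
  · simp [hr.ne', hc.ne']
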